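-- pv_equiv track=rewrite | github.com/Aveek-Saha/Movie-Script-Database | parse_files.py | get_char_dial
-- ===== SOURCE A (Python) =====
-- def separate_dial_meta(line_str):
--     if '(' in line_str and ')' in line_str:
--         bef_par_str = ' '.join(line_str.split('(')[0].split())
--         in_par_str = ' '.join(line_str.split('(')[1].split(')')[0].split())
--         rem_str = ')'.join(line_str.split(')')[1:])
--     else:
--         bef_par_str = line_str
--         in_par_str = ''
--         rem_str = ''
--
--     return bef_par_str, in_par_str, rem_str
--
-- def get_char_dial(script_noind, tag_vec, tag_set, char_max_words):
--     char_ind = [i for i, x in enumerate(script_noind) if tag_vec[i] not in tag_set and all([y.isupper() for y in x.split()])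
--                 and i != 0 and i != (len(script_noind) - 1)\
--                 # and len(script_noind[i - 1].split()) == 0\
--                 and len(script_noind[i + 1].split()) > 0\
--                 and len(x.split()) < char_max_words\
--                 and any([separate_dial_meta(x)[y] for y in [0, 2]])]
--     if char_ind[-1] < (len(script_noind) - 1):
--         char_ind += [len(script_noind) - 1]
--     else:
--         char_ind += [len(script_noind)]
--
--     for x in range(len(char_ind) - 1):
--         tag_vec[char_ind[x]] = 'C'
--         dial_flag = 1
--         while dial_flag > 0:
--             line_ind = char_ind[x] + dial_flag
--             if len(script_noind[line_ind].split()) > 0 and line_ind < char_ind[x + 1]: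
--                 dial_str, dial_meta_str, rem_str = separate_dial_meta(
--                     script_noind[line_ind])
--                 if dial_str != '' or rem_str != '':
--                     tag_vec[line_ind] = 'D'
--                 else:
--                     tag_vec[line_ind] = 'E'
--
--                 dial_flag += 1
--             else:
--                 dial_flag = 0
--
--     return tag_vec
-- ===== SOURCE B (Python) =====
-- # B: single linear scan with an 'active' flag instead of A's outer loop over character
-- # indices with an inner dial_flag forward-walk. Same in-place tagging of tag_vec as A;
-- # equivalence is claimed for the return value (side effect on tag_vec is the same writes).
--
-- def separate_dial_meta(line_str):
--     if '(' in line_str and ')' in line_str: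
--         bef_par_str = ' '.join(line_str.split('(')[0].split())
--         in_par_str = ' '.join(line_str.split('(')[1].split(')')[0].split())
--         rem_str = ')'.join(line_str.split(')')[1:])
--     else:
--         bef_par_str = line_str
--         in_par_str = ''
--         rem_str = ''
--     return bef_par_str, in_par_str, rem_str
--
--
-- def is_char_line(script_noind, tag_vec, tag_set, char_max_words, i):
--     line = script_noind[i]
--     return (tag_vec[i] not in tag_set
--             and 0 < i < len(script_noind) - 1
--             and all(w.isupper() for w in line.split())
--             and len(script_noind[i + 1].split()) > 0
--             and len(line.split()) < char_max_words
--             and (separate_dial_meta(line)[0] != '' or separate_dial_meta(line)[2] != ''))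
--
--
-- def get_char_dial(script_noind, tag_vec, tag_set, char_max_words):
--     n = len(script_noind)
--     is_char = [is_char_line(script_noind, tag_vec, tag_set, char_max_words, i)
--                for i in range(n)]
--     char_ind = [i for i, f in enumerate(is_char) if f]
--     active = False
--     # nothing is tagged before the first character line, and the last line never
--     for i in range(char_ind[0], n - 1):
--         if is_char[i]:
--             tag_vec[i] = 'C'
--             active = True
--         elif active:
--             if script_noind[i].split():
--                 dial_str, _, rem_str = separate_dial_meta(script_noind[i])
--                 tag_vec[i] = 'D' if dial_str != '' or rem_str != '' else 'E'
--             else: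
--                 active = False
--     return tag_vec
-- ===== Notes on version B (the rewrite author's own statement) =====
-- stated objective: alternative
-- what changed: A's outer loop over the character-index list with an inner dial_flag forward-walk is replaced by one linear scan from the first character line onward that keeps an 'active' flag (tag 'C' on a character line and activate, deactivate on a wordless line, tag 'D'/'E' while active).
import Mathlib
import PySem

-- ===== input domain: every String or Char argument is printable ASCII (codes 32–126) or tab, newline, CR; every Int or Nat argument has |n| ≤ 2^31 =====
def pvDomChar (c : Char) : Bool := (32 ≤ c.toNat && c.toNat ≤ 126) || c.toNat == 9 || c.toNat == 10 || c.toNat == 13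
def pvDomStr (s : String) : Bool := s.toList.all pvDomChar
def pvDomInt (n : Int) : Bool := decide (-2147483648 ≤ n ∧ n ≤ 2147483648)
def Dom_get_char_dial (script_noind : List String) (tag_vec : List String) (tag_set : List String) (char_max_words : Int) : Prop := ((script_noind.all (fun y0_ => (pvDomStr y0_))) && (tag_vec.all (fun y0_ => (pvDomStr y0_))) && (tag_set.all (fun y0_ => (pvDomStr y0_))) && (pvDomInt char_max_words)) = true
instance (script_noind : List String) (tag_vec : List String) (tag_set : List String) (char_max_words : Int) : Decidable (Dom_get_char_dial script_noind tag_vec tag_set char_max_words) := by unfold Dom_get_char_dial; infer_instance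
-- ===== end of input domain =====

-- B replaces A's outer loop over character indices with an inner dial_flag forward-walk by one
-- linear scan keeping an 'active' flag; equivalence is about the RETURN value (both Pythons
-- perform the same in-place writes to tag_vec).

-- ===== PORT A =====
-- Python str.isupper() for a word: at least one cased character and no lowercase one
-- (exact on the printable-ASCII domain, where the cased characters are A-Z and a-z).
def pyStrIsupper (s : String) : Bool :=
  s.toList.any (fun c => PySem.Chars.isupper c || PySem.Chars.islower c) &&
  s.toList.all (fun c => !PySem.Chars.islower c)

-- separate_dial_meta — module helper shared by both implementations.
-- list[0] / list[1] accesses are guarded by the '(' in s / ')' in s test, hence getD;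
-- split? never returns none here because both separators are non-empty.
def sepDialMeta (line_str : String) : String × String × String :=
  if PySem.Str.isIn "(" line_str && PySem.Str.isIn ")" line_str then
    let parL := (PySem.Str.split? line_str "(").getD []
    let bef_par_str := PySem.Str.join " " (PySem.Str.split₀ (parL.getD 0 ""))
    let in_par_str := PySem.Str.join " "
      (PySem.Str.split₀ ((((PySem.Str.split? (parL.getD 1 "") ")").getD []).getD 0 "")))
    let rem_str := PySem.Str.join ")" (((PySem.Str.split? line_str ")").getD []).drop 1)
    (bef_par_str, in_par_str, rem_str)
  else (line_str, "", "")

-- A's walk 'while dial_flag > 0' tagging script_noind[char_ind[x] + dial_flag];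
-- lineInd is char_ind[x] + dial_flag. All indices reached are in range whenever
-- Pre_ holds (lineInd ≤ bound ≤ len-1), so getD "" is the exact total form; the
-- fuel (length+1) exceeds the number of iterations, which is < bound - lineInd + 1.
def walkA (script : List String) (bound : Nat) (tags : List String) (lineInd : Nat) : Nat → List String
  | 0 => tags
  | fuel + 1 =>
    let line := script.getD lineInd ""
    if (PySem.Str.split₀ line).length > 0 && decide (lineInd < bound) then
      let d := sepDialMeta line
      walkA script bound
        (tags.set lineInd (if d.1 != "" || d.2.2 != "" then "D" else "E")) (lineInd + 1) fuel
    else tags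

-- 'for x in range(len(char_ind) - 1)' reading char_ind[x] and char_ind[x+1]:
-- structural recursion over adjacent pairs of char_ind.
def loopA (script : List String) : List Nat → List String → List String
  | c :: c' :: rest, tags =>
      let tags := tags.set c "C"
      let tags := walkA script c' tags (c + 1) (script.length + 1)
      loopA script (c' :: rest) tags
  | _, tags => tags

-- enumerate(script_noind) is ported as a loop over the indices i with x = script_noind[i]
-- (getD "" is exact: i < len). tag_vec[i] raises in Python when len(tag_vec) < len(script_noind);
-- that is outside Pre_, getD "" is the total form. char_ind[-1] on an empty char_ind raises
-- (outside Pre_); the total port reads it with default len(script_noind), taking the else branch.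
def get_char_dial (script_noind : List String) (tag_vec : List String) (tag_set : List String) (char_max_words : Int) : List String :=
  let n := script_noind.length
  let char_ind : List Nat := (List.range n).foldl (fun acc i =>
    let x := script_noind.getD i ""
    if !(tag_set.contains (tag_vec.getD i ""))
        && (PySem.Str.split₀ x).all pyStrIsupper
        && decide (i ≠ 0) && decide (i ≠ n - 1)
        && (PySem.Str.split₀ (script_noind.getD (i + 1) "")).length > 0
        && decide (((PySem.Str.split₀ x).length : Int) < char_max_words)
        && ((sepDialMeta x).1 != "" || (sepDialMeta x).2.2 != "")
    then acc ++ [i] else acc) []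
  let char_ind := if (((PySem.List.pyGet? char_ind (-1)).getD n : Nat) : Int) < (n : Int) - 1
    then char_ind ++ [n - 1] else char_ind ++ [n]
  loopA script_noind char_ind tag_vec

-- ===== PORT B =====
-- B's helper is_char_line (the same predicate A's comprehension tests, as one function).
def isCharLine (script_noind : List String) (tag_vec : List String) (tag_set : List String) (char_max_words : Int) (i : Nat) : Bool :=
  let line := script_noind.getD i ""
  !(tag_set.contains (tag_vec.getD i ""))
    && decide (0 < i) && decide (i < script_noind.length - 1)
    && (PySem.Str.split₀ line).all pyStrIsupper
    && (PySem.Str.split₀ (script_noind.getD (i + 1) "")).length > 0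
    && decide (((PySem.Str.split₀ line).length : Int) < char_max_words)
    && ((sepDialMeta line).1 != "" || (sepDialMeta line).2.2 != "")

-- the body of B's single for-loop: state = (tag_vec, active)
def stepB (script : List String) (isch : Nat → Bool) (st : List String × Bool) (i : Nat) : List String × Bool :=
  if isch i then (st.1.set i "C", true)
  else if st.2 then
    (if (PySem.Str.split₀ (script.getD i "")).length > 0 then
      let d := sepDialMeta (script.getD i "")
      (st.1.set i (if d.1 != "" || d.2.2 != "" then "D" else "E"), st.2)
    else (st.1, false))
  else st

-- char_ind[0] raises in Python when there is no character line (outside Pre_);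
-- headD 0 is the total form. range(char_ind[0], n - 1) is List.range' start ((n-1) - start).
def get_char_dial_alt (script_noind : List String) (tag_vec : List String) (tag_set : List String) (char_max_words : Int) : List String :=
  let n := script_noind.length
  let is_char := (List.range n).map (isCharLine script_noind tag_vec tag_set char_max_words)
  let char_ind : List Nat := (List.range n).foldl
    (fun acc i => if is_char.getD i false then acc ++ [i] else acc) []
  let start := char_ind.headD 0
  ((List.range' start (n - 1 - start)).foldl
    (stepB script_noind (fun i => is_char.getD i false)) (tag_vec, false)).1

-- ===== PRECONDITION & SPEC =====
-- Pre_ excludes exactly the inputs where the Python A raises: tag_vec shorter than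
-- script_noind (IndexError in the comprehension) and scripts with no character line
-- (IndexError at char_ind[-1]).
def Pre_get_char_dial (script_noind : List String) (tag_vec : List String) (tag_set : List String) (char_max_words : Int) : Prop :=
  script_noind.length ≤ tag_vec.length ∧
  (List.range script_noind.length).any (isCharLine script_noind tag_vec tag_set char_max_words) = true
instance (script_noind : List String) (tag_vec : List String) (tag_set : List String) (char_max_words : Int) : Decidable (Pre_get_char_dial script_noind tag_vec tag_set char_max_words) := by unfold Pre_get_char_dial; infer_instance

def pvWitness_get_char_dial : List String × List String × List String × Int :=
  (["x", "BOB", "hi there", "y"], ["0", "0", "0", "0"], ["M"], 5)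

def Spec_get_char_dial (script_noind : List String) (tag_vec : List String) (tag_set : List String) (char_max_words : Int) (out : List String) : Prop := out = get_char_dial_alt script_noind tag_vec tag_set char_max_words
instance (script_noind : List String) (tag_vec : List String) (tag_set : List String) (char_max_words : Int) (out : List String) : Decidable (Spec_get_char_dial script_noind tag_vec tag_set char_max_words out) := by unfold Spec_get_char_dial; infer_instance

-- ===== CLAIM (what is proved, stated in full; the proofs are below) =====
def Claim_equal_get_char_dial : Prop := ∀ (script_noind : List String) (tag_vec : List String) (tag_set : List String) (char_max_words : Int), Dom_get_char_dial script_noind tag_vec tag_set char_max_words → Pre_get_char_dial script_noind tag_vec tag_set char_max_words → Spec_get_char_dial script_noind tag_vec tag_set char_max_words (get_char_dial script_noind tag_vec tag_set char_max_words)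

-- ===== LEMMAS AND PROOFS =====

theorem pv_bool_shuffle (a u d1 d2 nx mw ab : Bool) :
    (a && u && d1 && d2 && nx && mw && ab) = (a && d1 && d2 && u && nx && mw && ab) := by
  cases a <;> cases u <;> cases d1 <;> cases d2 <;> simp

-- a character line lies strictly between the first and the last line
theorem isCharLine_bounds {script tagv tags : List String} {cmw : Int} {i : Nat}
    (h : isCharLine script tagv tags cmw i = true) : 0 < i ∧ i < script.length - 1 := by
  unfold isCharLine at h
  simp only [Bool.and_eq_true, decide_eq_true_eq] at h
  exact ⟨h.1.1.1.1.1.2, h.1.1.1.1.2⟩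

-- A's inline comprehension condition is B's is_char_line predicate
theorem acond_eq_isCharLine (script tagv tags : List String) (cmw : Int) (i : Nat)
    (hi : i < script.length) :
    (let x := script.getD i ""
     !(tags.contains (tagv.getD i ""))
        && (PySem.Str.split₀ x).all pyStrIsupper
        && decide (i ≠ 0) && decide (i ≠ script.length - 1)
        && (PySem.Str.split₀ (script.getD (i + 1) "")).length > 0
        && decide (((PySem.Str.split₀ x).length : Int) < cmw)
        && ((sepDialMeta x).1 != "" || (sepDialMeta x).2.2 != ""))
      = isCharLine script tagv tags cmw i := by
  have h1 : decide (i ≠ 0) = decide (0 < i) := by rw [decide_eq_decide]; omega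
  have h2 : decide (i ≠ script.length - 1) = decide (i < script.length - 1) := by
    rw [decide_eq_decide]; omega
  simp only [isCharLine, h1, h2]
  exact pv_bool_shuffle _ _ _ _ _ _ _

-- decomposition of a filtered index range at its first element
theorem filter_range'_cons {P : Nat → Bool} :
    ∀ (m a c : Nat) (r : List Nat), (List.range' a m).filter P = c :: r →
      P c = true ∧ a ≤ c ∧ c < a + m ∧ (∀ i, a ≤ i → i < c → P i = false) ∧
      r = (List.range' (c + 1) (a + m - (c + 1))).filter P := by
  intro m
  induction m with
  | zero => intro a c r h; simp at h
  | succ m ih =>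
    intro a c r h
    rw [List.range'_succ, List.filter_cons] at h
    by_cases hpa : P a = true
    · rw [if_pos hpa] at h
      obtain ⟨hc, hr⟩ := List.cons.inj h
      subst hc
      exact ⟨hpa, le_refl _, by omega, fun i h1 h2 => absurd h2 (by omega),
        by rw [show a + (m+1) - (a+1) = m by omega, hr]⟩
    · rw [if_neg hpa] at h
      obtain ⟨h1, h2, h3, h4, h5⟩ := ih (a + 1) c r h
      refine ⟨h1, by omega, by omega, fun i hai hic => ?_, by rw [h5, show a + 1 + m - (c+1) = a + (m+1) - (c+1) by omega]⟩
      rcases Nat.eq_or_lt_of_le hai with heq | hlt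
      · subst heq; simpa using hpa
      · exact h4 i hlt hic

-- B's scan over a char-free region with active = false leaves the state unchanged
theorem foldl_stepB_inactive (script : List String) (P : Nat → Bool) :
    ∀ (L : List Nat) (T : List String), (∀ i ∈ L, P i = false) →
      L.foldl (stepB script P) (T, false) = (T, false) := by
  intro L
  induction L with
  | nil => intro T _; rfl
  | cons x L ih =>
    intro T h
    rw [List.foldl_cons]
    have hx : P x = false := h x (List.mem_cons_self ..)
    simp only [stepB, hx, Bool.false_eq_true, if_false]
    exact ih T (fun i hi => h i (List.mem_cons_of_mem _ hi))

-- B's scan over a char-free region with active = true is A's dial walk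
theorem foldl_stepB_active (script : List String) (P : Nat → Bool) :
    ∀ (fuel a b : Nat) (T : List String), b - a ≤ fuel →
      (∀ i, a ≤ i → i < b → P i = false) →
      ((List.range' a (b - a)).foldl (stepB script P) (T, true)).1 = walkA script b T a fuel := by
  intro fuel
  induction fuel with
  | zero =>
    intro a b T hf _
    have : b - a = 0 := Nat.le_zero.mp hf
    rw [this]
    rfl
  | succ fuel ih =>
    intro a b T hf hnc
    by_cases hab : a < b
    · have hP : P a = false := hnc a (le_refl _) hab
      have hsplit : b - a = (b - (a+1)) + 1 := by omega
      rw [hsplit, List.range'_succ, List.foldl_cons]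
      by_cases hne : (PySem.Str.split₀ (script.getD a "")).length > 0
      · have hstep : stepB script P (T, true) a
            = (T.set a (if (sepDialMeta (script.getD a "")).1 != "" || (sepDialMeta (script.getD a "")).2.2 != "" then "D" else "E"), true) := by
          simp [stepB, hP, -List.getD_eq_getElem?_getD, hne]
        rw [hstep]
        unfold walkA
        rw [if_pos (show (decide ((PySem.Str.split₀ (script.getD a "")).length > 0)
              && decide (a < b)) = true by simp [-List.getD_eq_getElem?_getD, hne, hab])]
        exact ih (a+1) b _ (by omega) (fun i h1 h2 => hnc i (by omega) h2)
      · have hstep : stepB script P (T, true) a = (T, false) := by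
          simp [stepB, hP, -List.getD_eq_getElem?_getD, hne]
        rw [hstep]
        unfold walkA
        rw [if_neg (show ¬ (decide ((PySem.Str.split₀ (script.getD a "")).length > 0)
              && decide (a < b)) = true by simp [-List.getD_eq_getElem?_getD, hne])]
        rw [foldl_stepB_inactive script P _ _ (fun i hi => by
          have := List.mem_range'_1.mp hi
          exact hnc i (by omega) (by omega))]
    · have h0 : b - a = 0 := by omega
      rw [h0]
      unfold walkA
      rw [if_neg (show ¬ (decide ((PySem.Str.split₀ (script.getD a "")).length > 0)
            && decide (a < b)) = true by simp [hab])]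
      rfl

-- main invariant: from a character line c on, B's scan equals A's pair loop
theorem main_inv (script tagv tags : List String) (cmw : Int) :
    ∀ (rest : List Nat) (c : Nat) (T : List String) (a : Bool),
      isCharLine script tagv tags cmw c = true →
      rest = (List.range' (c + 1) (script.length - (c + 1))).filter (isCharLine script tagv tags cmw) →
      ((List.range' c (script.length - 1 - c)).foldl
          (stepB script (isCharLine script tagv tags cmw)) (T, a)).1
        = loopA script (c :: rest ++ [script.length - 1]) T := by
  intro rest
  induction rest with
  | nil =>
    intro c T a hP hrest
    have hc2 : c < script.length - 1 := (isCharLine_bounds hP).2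
    have hsp : script.length - 1 - c = (script.length - 1 - (c + 1)) + 1 := by omega
    rw [hsp, List.range'_succ, List.foldl_cons]
    have hstep : stepB script (isCharLine script tagv tags cmw) (T, a) c
        = (T.set c "C", true) := by simp [stepB, hP]
    rw [hstep]
    have hnc : ∀ i, c + 1 ≤ i → i < script.length - 1 →
        isCharLine script tagv tags cmw i = false := by
      intro i h1 h2
      have hmem : i ∈ List.range' (c + 1) (script.length - (c + 1)) :=
        List.mem_range'_1.mpr ⟨h1, by omega⟩
      simpa using List.filter_eq_nil_iff.mp hrest.symm i hmem
    rw [foldl_stepB_active script _ (script.length + 1) (c + 1) (script.length - 1) _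
      (by omega) hnc]
    rfl
  | cons c1 rest' ih =>
    intro c T a hP hrest
    have hc2 : c < script.length - 1 := (isCharLine_bounds hP).2
    obtain ⟨hp1, hcc1, hlt, hnc, hrest'⟩ := filter_range'_cons _ _ _ _ hrest.symm
    have hc12 : c1 < script.length - 1 := (isCharLine_bounds hp1).2
    have hsp : script.length - 1 - c = ((c1 - (c + 1)) + (script.length - 1 - c1)) + 1 := by
      omega
    rw [hsp, List.range'_succ, List.foldl_cons]
    have hstep : stepB script (isCharLine script tagv tags cmw) (T, a) c
        = (T.set c "C", true) := by simp [stepB, hP]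
    rw [hstep]
    have happ := List.range'_append (s := c + 1) (m := c1 - (c + 1))
      (n := script.length - 1 - c1) (step := 1)
    rw [one_mul, show (c + 1) + (c1 - (c + 1)) = c1 by omega] at happ
    rw [← happ, List.foldl_append]
    set S := (List.range' (c + 1) (c1 - (c + 1))).foldl
      (stepB script (isCharLine script tagv tags cmw)) (T.set c "C", true) with hS
    have hS1 : S.1 = walkA script c1 (T.set c "C") (c + 1) (script.length + 1) := by
      rw [hS]
      exact foldl_stepB_active script _ (script.length + 1) (c + 1) c1 _
        (by omega) (fun i h1 h2 => hnc i h1 h2)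
    have hSeta : S = (S.1, S.2) := rfl
    rw [hSeta, hS1]
    have hrest'' : rest' = (List.range' (c1 + 1) (script.length - (c1 + 1))).filter
        (isCharLine script tagv tags cmw) := by
      rw [hrest', show (c + 1) + (script.length - (c + 1)) - (c1 + 1)
        = script.length - (c1 + 1) by omega]
    rw [ih c1 _ S.2 hp1 hrest'']
    rfl

-- ===== VERDICT (by name: the statement is the Claim_ definition above) =====
theorem get_char_dial_spec : Claim_equal_get_char_dial := by
  intro s tv ts cmw hDom hPre
  obtain ⟨hlen, hany⟩ := hPre
  unfold Spec_get_char_dial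
  -- the character-index list is the filtered index range, and it is non-empty
  have hCne : (List.range s.length).filter (isCharLine s tv ts cmw) ≠ [] := by
    intro h
    rw [List.any_eq_true] at hany
    obtain ⟨i, hi, hPi⟩ := hany
    have hm : i ∈ (List.range s.length).filter (isCharLine s tv ts cmw) :=
      List.mem_filter.mpr ⟨hi, hPi⟩
    rw [h] at hm
    exact absurd hm (List.not_mem_nil)
  obtain ⟨c0, crest, hC⟩ := List.exists_cons_of_ne_nil hCne
  have hdec := filter_range'_cons s.length 0 c0 crest (by rw [← List.range_eq_range']; exact hC)
  obtain ⟨hp0, _, _, hnc0, hcrest⟩ := hdec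
  have hc0n : c0 < s.length - 1 := (isCharLine_bounds hp0).2
  have hcrest' : crest = (List.range' (c0 + 1) (s.length - (c0 + 1))).filter
      (isCharLine s tv ts cmw) := by
    rw [hcrest, show 0 + s.length - (c0 + 1) = s.length - (c0 + 1) by omega]
  -- A's side: comprehension = filter, the sentinel branch appends len-1
  have hA : get_char_dial s tv ts cmw = loopA s ((c0 :: crest) ++ [s.length - 1]) tv := by
    simp only [get_char_dial]
    rw [PySem.List.foldl_append_if_eq_filter, List.nil_append]
    have hfilt : (List.range s.length).filter (fun i =>
        let x := s.getD i ""
        !(ts.contains (tv.getD i ""))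
          && (PySem.Str.split₀ x).all pyStrIsupper
          && decide (i ≠ 0) && decide (i ≠ s.length - 1)
          && (PySem.Str.split₀ (s.getD (i + 1) "")).length > 0
          && decide (((PySem.Str.split₀ x).length : Int) < cmw)
          && ((sepDialMeta x).1 != "" || (sepDialMeta x).2.2 != ""))
        = (List.range s.length).filter (isCharLine s tv ts cmw) :=
      List.filter_congr (fun i hi => acond_eq_isCharLine s tv ts cmw i (List.mem_range.mp hi))
    rw [hfilt, hC, PySem.List.pyGet?_neg_one]
    have hlastmem : (c0 :: crest).getLast (List.cons_ne_nil _ _)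
        ∈ (List.range s.length).filter (isCharLine s tv ts cmw) := by
      rw [hC]; exact (c0 :: crest).getLast_mem (List.cons_ne_nil _ _)
    have hlastP := (List.mem_filter.mp hlastmem).2
    have hlastlt : (c0 :: crest).getLast (List.cons_ne_nil _ _) < s.length - 1 :=
      (isCharLine_bounds hlastP).2
    rw [List.getLast?_eq_some_getLast (List.cons_ne_nil _ _), Option.getD_some]
    rw [if_pos (by omega)]
  -- B's side: the is_char table lookup is the predicate itself, and the scan
  -- starts at the first character line c0
  have hB : get_char_dial_alt s tv ts cmw
      = ((List.range' c0 (s.length - 1 - c0)).foldl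
          (stepB s (isCharLine s tv ts cmw)) (tv, false)).1 := by
    simp only [get_char_dial_alt]
    rw [PySem.List.foldl_append_if_eq_filter, List.nil_append]
    have hfilt : (List.range s.length).filter (fun i =>
        ((List.range s.length).map (isCharLine s tv ts cmw)).getD i false)
        = (List.range s.length).filter (isCharLine s tv ts cmw) :=
      List.filter_congr (fun i hi =>
        PySem.List.getD_map_range _ _ _ _ (List.mem_range.mp hi))
    rw [hfilt, hC, List.headD_cons]
    congr 1
    apply PySem.List.foldl_congr_mem
    intro acc x hx
    have hb := List.mem_range'_1.mp hx
    have hxn : x < s.length := by omega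
    simp only [stepB]
    rw [PySem.List.getD_map_range _ _ _ _ hxn]
  rw [hA, hB]
  exact (main_inv s tv ts cmw crest c0 tv false hp0 hcrest').symm
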